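-- pv_equiv track=rewrite | github.com/cal20014/python_projects | project03/lab03/try_3.py | calc_total_days_in_full_years
-- ===== SOURCE A (Python) =====
-- def is_leap_year(year):
--     if year % 4 != 0:
--         return False
--     elif year % 100 != 0:
--         return True
--     elif year % 400 != 0:
--         return False
--     else:
--         return True
--
-- def calc_total_days_in_full_years(year):
--     total_days = 0
--     for year in range(1753, year):
--         if is_leap_year(year):
--             total_days += 366
--         else:
--             total_days += 365
--
--     return total_days
-- ===== SOURCE B (Python) =====
-- def calc_total_days_in_full_years(year):
--     # Closed form: 365 per year plus one extra day per Gregorian leap year in [1753, year-1].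
--     if year <= 1753:
--         return 0
--     def leaps_up_to(n):
--         return n // 4 - n // 100 + n // 400
--     return 365 * (year - 1753) + leaps_up_to(year - 1) - leaps_up_to(1752)
-- ===== Notes on version B (the rewrite author's own statement) =====
-- stated objective: faster
-- what changed: Replaces the per-year accumulation loop with a closed form: days-per-common-year times the number of full years plus the Gregorian leap-year count in the interval, obtained by floor-division formulas.
import Mathlib
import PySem

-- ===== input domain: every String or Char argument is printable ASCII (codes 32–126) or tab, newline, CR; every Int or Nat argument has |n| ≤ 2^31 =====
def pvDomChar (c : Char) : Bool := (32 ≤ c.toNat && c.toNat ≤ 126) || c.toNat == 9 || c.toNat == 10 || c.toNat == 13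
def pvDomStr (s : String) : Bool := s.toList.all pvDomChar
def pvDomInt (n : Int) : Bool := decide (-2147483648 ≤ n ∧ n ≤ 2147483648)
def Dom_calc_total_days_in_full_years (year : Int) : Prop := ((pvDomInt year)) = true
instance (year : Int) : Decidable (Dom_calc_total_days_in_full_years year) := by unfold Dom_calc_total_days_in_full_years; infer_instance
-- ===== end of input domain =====

-- B replaces A's per-year loop by a closed form (days per common year times year count plus a floor-division leap-year count); proved equal for all Int inputs.

-- ===== PORT A =====
def is_leap_year (year : Int) : Bool :=
  if PySem.Int.mod year 4 ≠ 0 then false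
  else if PySem.Int.mod year 100 ≠ 0 then true
  else if PySem.Int.mod year 400 ≠ 0 then false
  else true

def calc_total_days_in_full_years (year : Int) : Int :=
  (PySem.List.pyRange 1753 year 1).foldl
    (fun total_days y => if is_leap_year y then total_days + 366 else total_days + 365) 0

-- ===== PORT B =====
def leaps_up_to (n : Int) : Int :=
  PySem.Int.floordiv n 4 - PySem.Int.floordiv n 100 + PySem.Int.floordiv n 400

def calc_total_days_in_full_years_alt (year : Int) : Int :=
  if year ≤ 1753 then 0
  else 365 * (year - 1753) + leaps_up_to (year - 1) - leaps_up_to 1752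

-- ===== PRECONDITION & SPEC =====
def Spec_calc_total_days_in_full_years (year : Int) (out : Int) : Prop := out = calc_total_days_in_full_years_alt year
instance (year : Int) (out : Int) : Decidable (Spec_calc_total_days_in_full_years year out) := by unfold Spec_calc_total_days_in_full_years; infer_instance

-- ===== CLAIM (what is proved, stated in full; the proofs are below) =====
def Claim_equal_calc_total_days_in_full_years : Prop := ∀ (year : Int), Dom_calc_total_days_in_full_years year → Spec_calc_total_days_in_full_years year (calc_total_days_in_full_years year)

-- ===== LEMMAS AND PROOFS =====

-- closed form as a single formula (valid for year ≥ 1753)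
def pvF (year : Int) : Int := 365 * (year - 1753) + leaps_up_to (year - 1) - leaps_up_to 1752

theorem pvAlt_eq_F (year : Int) (h : 1753 ≤ year) :
    calc_total_days_in_full_years_alt year = pvF year := by
  unfold calc_total_days_in_full_years_alt pvF
  split_ifs with h1
  · have : year = 1753 := le_antisymm h1 h
    subst this
    norm_num [leaps_up_to]
  · ring

-- one-step increment of the closed form picks up exactly the leap-day
theorem pvDivStep4 (y : Int) : y / 4 - (y - 1) / 4 = if y % 4 = 0 then 1 else 0 := by
  split_ifs with h <;> omega

theorem pvDivStep100 (y : Int) : y / 100 - (y - 1) / 100 = if y % 100 = 0 then 1 else 0 := by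
  split_ifs with h <;> omega

theorem pvDivStep400 (y : Int) : y / 400 - (y - 1) / 400 = if y % 400 = 0 then 1 else 0 := by
  split_ifs with h <;> omega

theorem pvF_step (y : Int) :
    pvF (y + 1) = pvF y + (if is_leap_year y then (366 : Int) else 365) := by
  unfold pvF leaps_up_to is_leap_year
  have hy1 : y + 1 - 1 = y := by ring
  rw [hy1]
  have h4 : (0:Int) < 4 := by norm_num
  have h100 : (0:Int) < 100 := by norm_num
  have h400 : (0:Int) < 400 := by norm_num
  simp only [PySem.Int.mod_eq_emod_of_pos h4, PySem.Int.mod_eq_emod_of_pos h100,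
    PySem.Int.mod_eq_emod_of_pos h400, PySem.Int.floordiv_eq_ediv_of_pos h4,
    PySem.Int.floordiv_eq_ediv_of_pos h100, PySem.Int.floordiv_eq_ediv_of_pos h400]
  have d4 := pvDivStep4 y
  have d100 := pvDivStep100 y
  have d400 := pvDivStep400 y
  have m1 : y % 100 = 0 → y % 4 = 0 := by omega
  have m2 : y % 400 = 0 → y % 100 = 0 := by omega
  split_ifs at d4 d100 d400 ⊢ <;> simp_all <;> omega

theorem pvA_eq_F (k : Nat) :
    calc_total_days_in_full_years (1753 + k) = pvF (1753 + k) := by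
  induction k with
  | zero =>
      norm_num [calc_total_days_in_full_years, PySem.List.pyRange_one_eq_nil, pvF, leaps_up_to]
  | succ n ih =>
      unfold calc_total_days_in_full_years at *
      have hcast : (1753 : Int) + (↑(n + 1) : Int) = (1753 + (n : Int)) + 1 := by push_cast; ring
      rw [hcast, PySem.List.pyRange_one_succ_right (by omega), List.foldl_append]
      simp only [List.foldl]
      rw [ih, pvF_step (1753 + (n : Int))]
      split_ifs <;> ring

-- ===== VERDICT (by name: the statement is the Claim_ definition above) =====
theorem calc_total_days_in_full_years_spec : Claim_equal_calc_total_days_in_full_years := by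
  intro year _
  unfold Spec_calc_total_days_in_full_years
  by_cases h : 1753 ≤ year
  · rw [pvAlt_eq_F year h]
    have hk : year = 1753 + ((year - 1753).toNat : Int) := by omega
    rw [hk]
    exact pvA_eq_F (year - 1753).toNat
  · unfold calc_total_days_in_full_years calc_total_days_in_full_years_alt
    rw [PySem.List.pyRange_one_eq_nil (by omega)]
    simp
    omega
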